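-- pv_equiv track=rewrite | github.com/MrBrantCode/unitest_baseline | mut_generate/mist_train_cf/cf_88018/solution.py | sum_of_prime_elements
-- ===== SOURCE A (Python) =====
-- import math
--
-- def sum_of_prime_elements(input_array):
--     max_value = 1000  # Maximum possible value in the input array
--     primes = [True] * (max_value + 1)
--     primes[0] = primes[1] = False
--
--     for i in range(2, int(math.sqrt(max_value)) + 1):
--         if primes[i]:
--             for j in range(i**2, max_value + 1, i):
--                 primes[j] = False
--
--     sum_primes = 0
--     for num in input_array:
--         if 0 < num <= max_value and primes[num]:
--             sum_primes += num
--
--     return hex(sum_primes)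
-- ===== SOURCE B (Python) =====
-- def sum_of_prime_elements(input_array):
--     def is_prime(n):
--         if n < 2:
--             return False
--         i = 2
--         while i * i <= n:
--             if n % i == 0:
--                 return False
--             i += 1
--         return True
--
--     sum_primes = sum(num for num in input_array if 0 < num <= 1000 and is_prime(num))
--     return hex(sum_primes)
-- ===== Notes on version B (the rewrite author's own statement) =====
-- stated objective: simpler
-- what changed: Replaces A's precomputed 1001-entry Eratosthenes sieve table (built on every call, then scanned) by a single pass that tests each qualifying element directly with trial division up to its square root; the sum is a filtered comprehension instead of an accumulator loop.
import Mathlib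
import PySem

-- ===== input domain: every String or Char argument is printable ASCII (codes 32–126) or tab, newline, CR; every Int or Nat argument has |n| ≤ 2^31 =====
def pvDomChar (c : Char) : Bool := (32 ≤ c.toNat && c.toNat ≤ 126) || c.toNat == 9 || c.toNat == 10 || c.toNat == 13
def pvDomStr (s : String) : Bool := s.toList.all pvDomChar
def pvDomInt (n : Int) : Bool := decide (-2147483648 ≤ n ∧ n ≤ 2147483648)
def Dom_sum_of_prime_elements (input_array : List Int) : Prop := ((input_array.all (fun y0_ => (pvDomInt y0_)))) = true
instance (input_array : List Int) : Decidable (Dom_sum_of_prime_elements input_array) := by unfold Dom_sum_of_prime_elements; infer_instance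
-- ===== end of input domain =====

-- B replaces A's per-call sieve table by direct trial division on each element; alternative decomposition, not claimed faster.

-- Python's hex(n) (shared by both ports, like the builtin itself).
def pyHexDigit (n : Nat) : Char := if n < 10 then Char.ofNat (48 + n) else Char.ofNat (87 + n)
def pyHexDigits : Nat → List Char
  | n =>
    if _h : n < 16 then [pyHexDigit n]
    else pyHexDigits (n / 16) ++ [pyHexDigit (n % 16)]
  decreasing_by exact Nat.div_lt_self (by omega) (by omega)
def pyHex (n : Int) : String :=
  if n < 0 then "-0x" ++ String.ofList (pyHexDigits (-n).toNat)
  else "0x" ++ String.ofList (pyHexDigits n.toNat)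

-- ===== PORT A =====
-- A's sieve over 0..1000; int(math.sqrt(1000)) = 31 exactly, so the outer range is range(2, 32).
def pvSieveA : List Bool :=
  let primes := ((List.replicate 1001 true).set 0 false).set 1 false
  (PySem.List.pyRange 2 32 1).foldl (fun ps i =>
    if ps.getD i.toNat false then
      (PySem.List.pyRange (i ^ 2) 1001 i).foldl (fun qs j => qs.set j.toNat false) ps
    else ps) primes

def sum_of_prime_elements (input_array : List Int) : String :=
  let primes := pvSieveA
  let sum_primes := input_array.foldl
    (fun s num => if 0 < num && num ≤ 1000 && primes.getD num.toNat false then s + num else s) 0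
  pyHex sum_primes

-- ===== PORT B =====
-- the `while i * i <= n` trial-division loop of Source B; the fuel n.toNat is an upper bound on the
-- iteration count (the loop stops once i*i > n, and i starts at 2), so this is exact for every n
def pvTrial (n : Int) : Int → Nat → Bool
  | _, 0 => true
  | i, f + 1 => if i * i ≤ n then (if PySem.Int.mod n i == 0 then false else pvTrial n (i + 1) f) else true

def pvIsPrimeB (n : Int) : Bool :=
  if n < 2 then false else pvTrial n 2 n.toNat

def sum_of_prime_elements_alt (input_array : List Int) : String :=
  pyHex ((input_array.filter (fun num => 0 < num && num ≤ 1000 && pvIsPrimeB num)).sum)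

-- ===== PRECONDITION & SPEC =====
def Spec_sum_of_prime_elements (input_array : List Int) (out : String) : Prop := out = sum_of_prime_elements_alt input_array
instance (input_array : List Int) (out : String) : Decidable (Spec_sum_of_prime_elements input_array out) := by unfold Spec_sum_of_prime_elements; infer_instance

-- ===== CLAIM (what is proved, stated in full; the proofs are below) =====
def Claim_equal_sum_of_prime_elements : Prop := ∀ (input_array : List Int), Dom_sum_of_prime_elements input_array → Spec_sum_of_prime_elements input_array (sum_of_prime_elements input_array)

-- ===== LEMMAS AND PROOFS =====

-- proof-side names for the pieces of A's sieve
def pvInit : List Bool := ((List.replicate 1001 true).set 0 false).set 1 false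
def pvMark (ps : List Bool) (i : Int) : List Bool :=
  if ps.getD i.toNat false then
    (PySem.List.pyRange (i ^ 2) 1001 i).foldl (fun qs j => qs.set j.toNat false) ps
  else ps

lemma pvSieveA_def : pvSieveA = (PySem.List.pyRange 2 32 1).foldl pvMark pvInit := rfl

-- "no divisor d with 2 ≤ d < t": what the sieve has established after processing 2..t-1
def pvFree (t : Int) (n : Nat) : Prop :=
  2 ≤ (n : Int) ∧ ∀ d : Int, 2 ≤ d → d < t → d * d ≤ (n : Int) → ¬ d ∣ (n : Int)

lemma getD_foldl_set_false (js : List Int) (ps : List Bool) (n : Nat) :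
    ((js.foldl (fun qs j => qs.set j.toNat false) ps).getD n false)
      = (ps.getD n false && !(js.any (fun j => j.toNat == n))) := by
  induction js generalizing ps with
  | nil => simp
  | cons j js ih =>
    simp only [List.foldl_cons, List.any_cons, ih, Bool.not_or,
      List.getD_eq_getElem?_getD, List.getElem?_set]
    by_cases hj : j.toNat = n
    · simp only [hj, beq_self_eq_true, Bool.not_true]
      split_ifs <;> simp
    · have hb : (j.toNat == n) = false := by simp [hj]
      simp [hb, hj, Bool.and_comm]

lemma getD_pvInit (n : Nat) (hn : n ≤ 1000) :
    (pvInit.getD n false = true) ↔ 2 ≤ (n : Int) := by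
  unfold pvInit
  simp only [List.getD_eq_getElem?_getD, List.getElem?_set, List.length_set,
    List.length_replicate, List.getElem?_replicate]
  rcases n with _ | _ | n
  · simp
  · simp
  · have h : n + 2 < 1001 := by omega
    simp only [h, if_true]
    constructor
    · intro _; push_cast; omega
    · intro _; rfl

lemma pvSieve_invariant (m : Nat) (hm : (m : Int) ≤ 30) : ∀ (n : Nat), n ≤ 1000 →
    (((((PySem.List.pyRange 2 (2 + (m : Int)) 1).foldl pvMark pvInit).getD n false) = true)
      ↔ pvFree (2 + (m : Int)) n) := by
  induction m with
  | zero =>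
    intro n hn
    rw [show (2 + ((0 : Nat) : Int)) = 2 by norm_num]
    rw [PySem.List.pyRange_one_eq_nil le_rfl]
    simp only [List.foldl_nil]
    rw [getD_pvInit n hn]
    unfold pvFree
    constructor
    · exact fun h => ⟨h, fun d hd hdt => by omega⟩
    · exact fun h => h.1
  | succ m ih =>
    intro n hn
    have hmz : (0 : Int) ≤ (m : Int) := Int.natCast_nonneg m
    rw [show (2 + ((m + 1 : Nat) : Int)) = (2 + (m : Int)) + 1 by push_cast; ring]
    rw [PySem.List.pyRange_one_succ_right (by omega : (2 : Int) ≤ 2 + (m : Int))]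
    rw [List.foldl_append]
    simp only [List.foldl_cons, List.foldl_nil]
    have hm30 : (m : Int) ≤ 30 := by push_cast at hm; omega
    generalize hT : (2 + (m : Int)) = t at *
    have h2t : 2 ≤ t := by omega
    have ht31 : t ≤ 31 := by omega
    set prev := (PySem.List.pyRange 2 t 1).foldl pvMark pvInit with hprev
    have htNc : ((t.toNat : Int)) = t := by omega
    unfold pvMark
    by_cases hc : prev.getD t.toNat false = true
    · rw [if_pos hc]
      rw [getD_foldl_set_false]
      have hany : (((PySem.List.pyRange (t ^ 2) 1001 t).any (fun j => j.toNat == n)) = true)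
          ↔ (t ^ 2 ≤ (n : Int) ∧ t ∣ ((n : Int) - t ^ 2)) := by
        rw [List.any_eq_true]
        constructor
        · rintro ⟨j, hjmem, hj⟩
          rw [PySem.List.mem_pyRange_iff_of_pos (by omega)] at hjmem
          have hj' : j.toNat = n := by simpa using hj
          have ht2 : (0 : Int) ≤ t ^ 2 := by positivity
          have hjn : j = (n : Int) := by omega
          rw [hjn] at hjmem
          exact ⟨hjmem.1, hjmem.2.2⟩
        · rintro ⟨h1, h2⟩
          refine ⟨(n : Int), ?_, by simp⟩
          rw [PySem.List.mem_pyRange_iff_of_pos (by omega)]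
          exact ⟨h1, by omega, h2⟩
      simp only [Bool.and_eq_true, Bool.not_eq_eq_eq_not, Bool.not_true, ← Bool.not_eq_true]
      rw [hany, ih hm30 n hn]
      unfold pvFree
      constructor
      · rintro ⟨⟨h2n, hall⟩, hnot⟩
        refine ⟨h2n, fun d hd hdt hdd hdvd => ?_⟩
        rcases (by omega : d < t ∨ d = t) with hlt | heq
        · exact hall d hd hlt hdd hdvd
        · subst heq
          exact hnot ⟨by nlinarith, dvd_sub hdvd ⟨d, by ring⟩⟩
      · rintro ⟨h2n, hall⟩
        refine ⟨⟨h2n, fun d hd hdt => hall d hd (by omega)⟩, ?_⟩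
        rintro ⟨hle, hdvd⟩
        have htn : t ∣ (n : Int) := by
          have := dvd_add hdvd (⟨t, by ring⟩ : t ∣ t ^ 2)
          simpa using this
        exact hall t (by omega) (by omega) (by nlinarith) htn
    · rw [if_neg hc]
      have hfree := ih hm30 t.toNat (by omega)
      have hnotfree : ¬ pvFree t t.toNat := fun h => hc (hfree.mpr h)
      unfold pvFree at hnotfree
      push_neg at hnotfree
      obtain ⟨d0, hd02, hd0t, hd0dd, hd0dvd⟩ := hnotfree (by omega)
      rw [htNc] at hd0dd hd0dvd
      rw [ih hm30 n hn]
      unfold pvFree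
      constructor
      · rintro ⟨h2n, hall⟩
        refine ⟨h2n, fun d hd hdt1 hdd hdvd => ?_⟩
        rcases (by omega : d < t ∨ d = t) with hlt | heq
        · exact hall d hd hlt hdd hdvd
        · subst heq
          exact hall d0 hd02 hd0t (by nlinarith) (hd0dvd.trans hdvd)
      · rintro ⟨h2n, hall⟩
        exact ⟨h2n, fun d hd hdt => hall d hd (by omega)⟩

lemma pvSieveA_getD (n : Nat) (hn : n ≤ 1000) :
    (pvSieveA.getD n false = true) ↔ pvFree 32 n := by
  have h := pvSieve_invariant 30 (by norm_num) n hn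
  rw [pvSieveA_def]
  norm_num at h
  exact h

lemma pvTrial_iff (n : Int) (fuel : Nat) (i : Int) (hi : 2 ≤ i)
    (hfuel : n.toNat + 1 ≤ i.toNat + fuel) (hn : 2 ≤ n) :
    (pvTrial n i fuel = true) ↔ ∀ d : Int, i ≤ d → d * d ≤ n → ¬ d ∣ n := by
  induction fuel generalizing i with
  | zero =>
    have hni : n < i := by omega
    simp only [pvTrial, true_iff]
    intro d hd hdd
    exfalso
    nlinarith
  | succ f ih =>
    simp only [pvTrial]
    by_cases hii : i * i ≤ n
    · rw [if_pos hii]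
      by_cases hmod : PySem.Int.mod n i = 0
      · have hdvd : i ∣ n := (PySem.Int.mod_eq_zero_iff_dvd n i).mp hmod
        simp only [hmod, beq_self_eq_true, if_true]
        constructor
        · intro h; exact absurd h (by simp)
        · intro h; exact absurd hdvd (h i le_rfl hii)
      · have hb : (PySem.Int.mod n i == 0) = false := by simp [hmod]
        rw [hb]
        simp only [Bool.false_eq_true, if_false]
        rw [ih (i + 1) (by omega) (by omega)]
        constructor
        · intro h d hd hdd
          rcases eq_or_lt_of_le hd with rfl | hlt
          · exact fun hdvd => hmod ((PySem.Int.mod_eq_zero_iff_dvd n i).mpr hdvd)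
          · exact h d (by omega) hdd
        · intro h d hd hdd
          exact h d (by omega) hdd
    · rw [if_neg hii]
      simp only [true_iff]
      intro d hd hdd
      exfalso
      nlinarith


lemma pvIsPrimeB_iff (n : Int) :
    (pvIsPrimeB n = true) ↔ (2 ≤ n ∧ ∀ d : Int, 2 ≤ d → d * d ≤ n → ¬ d ∣ n) := by
  unfold pvIsPrimeB
  by_cases hn : n < 2
  · simp only [hn, if_true]
    constructor
    · intro h; exact absurd h (by simp)
    · intro h; omega
  · have hn2 : 2 ≤ n := by omega
    rw [if_neg hn, pvTrial_iff n n.toNat 2 le_rfl (by omega) hn2]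
    constructor
    · exact fun h => ⟨hn2, h⟩
    · exact fun h => h.2

lemma pvCond_eq (num : Int) :
    (0 < num && num ≤ 1000 && pvSieveA.getD num.toNat false)
      = (0 < num && num ≤ 1000 && pvIsPrimeB num) := by
  by_cases h : 0 < num ∧ num ≤ 1000
  · obtain ⟨h1, h2⟩ := h
    simp only [decide_eq_true h1, decide_eq_true h2, Bool.true_and]
    rw [Bool.eq_iff_iff]
    rw [pvSieveA_getD num.toNat (by omega), pvIsPrimeB_iff]
    have hc : ((num.toNat : Int)) = num := by omega
    unfold pvFree
    rw [hc]
    constructor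
    · rintro ⟨ha, hb⟩
      exact ⟨ha, fun d hd hdd => hb d hd (by nlinarith) hdd⟩
    · rintro ⟨ha, hb⟩
      exact ⟨ha, fun d hd _ hdd => hb d hd hdd⟩
  · rcases not_and_or.mp h with h' | h' <;> simp [h']

lemma pvFoldl_filter_sum (p : Int → Bool) (l : List Int) (acc : Int) :
    l.foldl (fun s num => if p num then s + num else s) acc = acc + (l.filter p).sum := by
  induction l generalizing acc with
  | nil => simp
  | cons x xs ih =>
    by_cases hp : p x <;> simp [List.foldl_cons, hp, ih] <;> ring

-- ===== VERDICT (by name: the statement is the Claim_ definition above) =====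
theorem sum_of_prime_elements_spec : Claim_equal_sum_of_prime_elements := by
  intro input_array _
  unfold Spec_sum_of_prime_elements sum_of_prime_elements sum_of_prime_elements_alt
  simp only [pvFoldl_filter_sum, zero_add]
  refine congrArg pyHex (congrArg List.sum ?_)
  exact List.filter_congr (fun x _ => pvCond_eq x)
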